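-- pv_equiv track=rewrite | github.com/PetrPrazak/AdventOfCode | 2016/20/aoc2016_20.py | total_allowed
-- ===== SOURCE A (Python) =====
-- MAX_IP = 2**32
--
-- def total_allowed(data):
--     lowest = 0
--     total = 0
--     for ip_min, ip_max in data:
--         if ip_min > lowest + 1:
--             total += ip_min - lowest - 1
--         lowest = max(lowest, ip_max)
--     total += MAX_IP - lowest - 1
--     return total
-- ===== SOURCE B (Python) =====
-- MAX_IP = 2**32
--
-- def total_allowed(data):
--     def go(seg, low):
--         # summary of a segment: (total gap inside seg, running max after seg)
--         if not seg:
--             return (0, low)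
--         if len(seg) == 1:
--             a, b = seg[0]
--             gap = a - low - 1 if a > low + 1 else 0
--             return (gap, max(low, b))
--         mid = len(seg) // 2
--         g1, m1 = go(seg[:mid], low)
--         g2, m2 = go(seg[mid:], m1)
--         return (g1 + g2, m2)
--     g, m = go(list(data), 0)
--     return g + MAX_IP - m - 1
-- ===== Notes on version B (the rewrite author's own statement) =====
-- stated objective: alternative
-- what changed: A's sequential accumulator sweep is replaced by a divide-and-conquer reduction: each half of the list is recursively summarized as a pair (gap total, outgoing running max) and the two summaries are combined, relying on the associativity of that combine step.
import Mathlib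
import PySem

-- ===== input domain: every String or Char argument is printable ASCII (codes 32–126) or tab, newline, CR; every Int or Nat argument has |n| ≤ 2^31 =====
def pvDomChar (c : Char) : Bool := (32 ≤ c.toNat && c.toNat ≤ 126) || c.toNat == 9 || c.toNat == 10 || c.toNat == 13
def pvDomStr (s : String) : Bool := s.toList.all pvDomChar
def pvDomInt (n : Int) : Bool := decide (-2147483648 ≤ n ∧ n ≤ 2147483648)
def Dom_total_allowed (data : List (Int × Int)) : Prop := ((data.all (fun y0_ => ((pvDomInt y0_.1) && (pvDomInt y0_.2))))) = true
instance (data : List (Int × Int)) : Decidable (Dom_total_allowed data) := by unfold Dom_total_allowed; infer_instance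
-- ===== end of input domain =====

-- B replaces A's sequential sweep by a divide-and-conquer reduction over half-segments,
-- each summarized as (gap total, outgoing running max) (alternative decomposition, not faster).
-- ===== PORT A =====
def total_allowed (data : List (Int × Int)) : Int :=
  let s := data.foldl
    (fun (s : Int × Int) p =>
      (max s.1 p.2, if p.1 > s.1 + 1 then s.2 + (p.1 - s.1 - 1) else s.2))
    (0, 0)
  s.2 + (4294967296 - s.1 - 1)

-- ===== PORT B =====
-- recursive helper `go` from Source B: summary of a segment = (gap total, running max after seg)
def goB (seg : List (Int × Int)) (low : Int) : Int × Int :=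
  match seg with
  | [] => (0, low)
  | [p] => ((if p.1 > low + 1 then p.1 - low - 1 else 0), max low p.2)
  | a :: b :: t =>
    let mid := (a :: b :: t).length / 2
    let r1 := goB ((a :: b :: t).take mid) low
    let r2 := goB ((a :: b :: t).drop mid) r1.2
    (r1.1 + r2.1, r2.2)
termination_by seg.length
decreasing_by
  · simp [List.length_take]; omega
  · simp; omega

def total_allowed_alt (data : List (Int × Int)) : Int :=
  let r := goB data 0
  r.1 + 4294967296 - r.2 - 1

-- ===== PRECONDITION & SPEC =====
def Spec_total_allowed (data : List (Int × Int)) (out : Int) : Prop := out = total_allowed_alt data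
instance (data : List (Int × Int)) (out : Int) : Decidable (Spec_total_allowed data out) := by unfold Spec_total_allowed; infer_instance

-- ===== CLAIM (what is proved, stated in full; the proofs are below) =====
def Claim_equal_total_allowed : Prop := ∀ (data : List (Int × Int)), Dom_total_allowed data → Spec_total_allowed data (total_allowed data)

-- ===== LEMMAS AND PROOFS =====
-- final running max (= A's final `lowest`)
def fmax : Int → List (Int × Int) → Int
  | low, [] => low
  | low, p :: t => fmax (max low p.2) t

-- total of the gaps between ranges, given the running max so far
def gaps : Int → List (Int × Int) → Int
  | _, [] => 0
  | low, p :: t => (if p.1 > low + 1 then p.1 - low - 1 else 0) + gaps (max low p.2) t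

theorem loopA_eq (data : List (Int × Int)) : ∀ (low t : Int),
    data.foldl (fun (s : Int × Int) p =>
      (max s.1 p.2, if p.1 > s.1 + 1 then s.2 + (p.1 - s.1 - 1) else s.2)) (low, t)
      = (fmax low data, t + gaps low data) := by
  induction data with
  | nil => intro low t; simp [fmax, gaps]
  | cons p d ih =>
    intro low t
    simp only [List.foldl_cons, fmax, gaps, ih]
    split_ifs <;> ring_nf

theorem fmax_append (s t : List (Int × Int)) : ∀ (low : Int),
    fmax low (s ++ t) = fmax (fmax low s) t := by
  induction s with
  | nil => intro low; simp [fmax]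
  | cons p d ih => intro low; simp [fmax, ih]

theorem gaps_append (s t : List (Int × Int)) : ∀ (low : Int),
    gaps low (s ++ t) = gaps low s + gaps (fmax low s) t := by
  induction s with
  | nil => intro low; simp [gaps, fmax]
  | cons p d ih => intro low; simp [gaps, fmax, ih]; ring

theorem goB_eq : ∀ (seg : List (Int × Int)) (low : Int),
    goB seg low = (gaps low seg, fmax low seg) := by
  have key : ∀ (n : Nat) (seg : List (Int × Int)), seg.length ≤ n → ∀ (low : Int),
      goB seg low = (gaps low seg, fmax low seg) := by
    intro n
    induction n with
    | zero =>
      intro seg h low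
      match seg with
      | [] => simp [goB, gaps, fmax]
      | _ :: _ => simp at h
    | succ n ih =>
      intro seg h low
      match seg with
      | [] => simp [goB, gaps, fmax]
      | [p] => simp [goB, gaps, fmax]
      | a :: b :: t =>
        rw [goB]
        have hlen : (a :: b :: t).length = t.length + 2 := by simp
        have h1 : (List.take ((a :: b :: t).length / 2) (a :: b :: t)).length ≤ n := by
          simp only [List.length_take, hlen] at *; omega
        have h2 : (List.drop ((a :: b :: t).length / 2) (a :: b :: t)).length ≤ n := by
          simp only [List.length_drop, hlen] at *; omega
        rw [ih _ h1, ih _ h2]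
        conv_rhs => rw [← List.take_append_drop ((a :: b :: t).length / 2) (a :: b :: t)]
        rw [gaps_append, fmax_append]
  intro seg low
  exact key seg.length seg le_rfl low

-- ===== VERDICT (by name: the statement is the Claim_ definition above) =====
theorem total_allowed_spec : Claim_equal_total_allowed := by
  intro data _
  unfold Spec_total_allowed total_allowed total_allowed_alt
  rw [loopA_eq, goB_eq]
  ring
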